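-- pv_equiv track=rewrite | github.com/RMCV-Rajapaksha/Competitive-Programing-New | Xtreme Encode/Coupon Code.py | count_similar_pairs
-- ===== SOURCE A (Python) =====
-- from collections import defaultdict
--
-- def count_similar_pairs(codes):
--     def generate_variants(code):
--         """Generate all variants of the code by replacing each character with a wildcard."""
--         variants = []
--         for i in range(len(code)):
--             if code[i] != '-':
--                 variant = code[:i] + '?' + code[i+1:]
--                 variants.append(variant)
--         return variants
--
--     # Store the count of each variant
--     variant_count = defaultdict(int)
--
--     for code in codes:
--         variants = generate_variants(code)
--         for variant in variants:
--             variant_count[variant] += 1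
--
--     # Calculate the number of similar pairs
--     similar_pairs = 0
--     for count in variant_count.values():
--         if count > 1:
--             similar_pairs += count * (count - 1) // 2
--
--     return similar_pairs
-- ===== SOURCE B (Python) =====
-- def count_similar_pairs(codes):
--     seen = []
--     total = 0
--     for code in codes:
--         for i, ch in enumerate(code):
--             if ch != '-':
--                 v = code[:i] + '?' + code[i+1:]
--                 total += seen.count(v)
--                 seen.append(v)
--     return total
-- ===== Notes on version B (the rewrite author's own statement) =====
-- stated objective: simpler
-- what changed: Replaces the defaultdict of variant multiplicities plus a final sum of count*(count-1)//2 by a single incremental pass that, for each new wildcard variant, adds the number of equal variants seen so far - no dictionary and no combinatorial formula.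
import Mathlib
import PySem

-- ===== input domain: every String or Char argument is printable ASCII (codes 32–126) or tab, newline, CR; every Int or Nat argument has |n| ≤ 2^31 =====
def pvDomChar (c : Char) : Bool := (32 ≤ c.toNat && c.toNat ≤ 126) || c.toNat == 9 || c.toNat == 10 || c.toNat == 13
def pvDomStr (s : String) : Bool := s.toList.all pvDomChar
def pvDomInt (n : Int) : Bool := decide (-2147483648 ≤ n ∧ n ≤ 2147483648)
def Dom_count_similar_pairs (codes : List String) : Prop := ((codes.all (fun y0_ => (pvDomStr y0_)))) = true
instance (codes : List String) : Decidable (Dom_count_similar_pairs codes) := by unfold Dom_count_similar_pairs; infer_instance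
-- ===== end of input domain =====

-- B replaces A's defaultdict of variant multiplicities plus the final sum of count*(count-1)//2 by a single
-- incremental pass adding, for each new wildcard variant, the number of equal variants seen so far (objective: simpler).

-- ===== PORT A =====
def pvVariantsA (code : List Char) : List (List Char) :=
  (PySem.List.pyRange 0 (code.length : Int) 1).foldl
    (fun variants i =>
      if PySem.List.pyGet? code i ≠ some '-' then
        variants ++ [PySem.List.slice code none (some i) ++ '?' :: PySem.List.slice code (some (i + 1)) none]
      else variants) []

def count_similar_pairs (codes : List String) : Int :=
  let variant_count : PySem.Dict (List Char) Int :=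
    codes.foldl (fun d code =>
      (pvVariantsA code.toList).foldl (fun d v => d.modify v 0 (· + 1)) d) PySem.Dict.empty
  variant_count.values.foldl
    (fun similar_pairs count =>
      if count > 1 then similar_pairs + PySem.Int.floordiv (count * (count - 1)) 2 else similar_pairs) 0

-- ===== PORT B =====
-- state: (seen, total); for each non-dash position the masked variant v is formed,
-- total += seen.count(v), seen.append(v)
def count_similar_pairs_alt (codes : List String) : Int :=
  (codes.foldl (fun st code =>
      (PySem.List.enumerate code.toList).foldl (fun st p =>
        if p.2 ≠ '-' then
          let v := PySem.List.slice code.toList none (some p.1) ++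
                   '?' :: PySem.List.slice code.toList (some (p.1 + 1)) none
          (st.1 ++ [v], st.2 + (PySem.List.count st.1 v : Int))
        else st) st)
    (([], 0) : List (List Char) × Int)).2

-- ===== PRECONDITION & SPEC =====
def Spec_count_similar_pairs (codes : List String) (out : Int) : Prop :=
  out = count_similar_pairs_alt codes
instance (codes : List String) (out : Int) : Decidable (Spec_count_similar_pairs codes out) := by
  unfold Spec_count_similar_pairs; infer_instance

-- ===== CLAIM (what is proved, stated in full; the proofs are below) =====
def Claim_equal_count_similar_pairs : Prop := ∀ (codes : List String), Dom_count_similar_pairs codes → Spec_count_similar_pairs codes (count_similar_pairs codes)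

-- ===== LEMMAS AND PROOFS =====

-- reference recursion for the variant list of a code: each non-dash position masked by '?', in order
def pvV : List Char → List (List Char)
  | [] => []
  | c :: s => (if c = '-' then [] else [('?' :: s)]) ++ (pvV s).map (c :: ·)

-- number of (unordered) pairs of equal elements in a list
def pvPc : List (List Char) → Nat
  | [] => 0
  | x :: xs => xs.count x + pvPc xs

-- number of cross pairs (one element of a, one of b) that are equal
def pvCross (a b : List (List Char)) : Nat := (a.map (fun x => b.count x)).sum

def pvCh (n : Nat) : Nat := n * (n - 1) / 2

lemma pvCross_append_left (a a' b : List (List Char)) :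
    pvCross (a ++ a') b = pvCross a b + pvCross a' b := by
  simp [pvCross]

lemma pvCross_append_right (a b b' : List (List Char)) :
    pvCross a (b ++ b') = pvCross a b + pvCross a b' := by
  simp only [pvCross, List.count_append]
  rw [List.sum_map_add]

lemma pvCount_singleton' (a b : List Char) : List.count a [b] = if a = b then 1 else 0 := by
  by_cases h : a = b
  · subst h; simp
  · simp [h, Ne.symm h]

lemma pvSum_indicator (l : List (List Char)) (t : List Char) :
    (l.map (fun a => if a = t then (1 : Nat) else 0)).sum = l.count t := by
  induction l with
  | nil => simp
  | cons x l ih =>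
    by_cases h : x = t
    · subst h; simp [ih]; omega
    · simp [h, ih]

lemma pvCross_singleton_left (v : List Char) (b : List (List Char)) :
    pvCross [v] b = b.count v := by
  simp [pvCross]

lemma pvCross_singleton_right (a : List (List Char)) (v : List Char) :
    pvCross a [v] = a.count v := by
  unfold pvCross
  rw [List.map_congr_left (fun x (_ : x ∈ a) => pvCount_singleton' x v), pvSum_indicator]

lemma pvPc_append : ∀ (a b : List (List Char)), pvPc (a ++ b) = pvPc a + pvPc b + pvCross a b := by
  intro a b
  induction a with
  | nil => simp [pvPc, pvCross]
  | cons x a ih =>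
    simp only [List.cons_append, pvPc, List.count_append, ih, pvCross, List.map_cons, List.sum_cons]
    omega

lemma pvPc_append_singleton (L : List (List Char)) (x : List Char) :
    pvPc (L ++ [x]) = pvPc L + L.count x := by
  rw [pvPc_append, pvCross_singleton_right]
  simp [pvPc]

lemma pvCh_succ (n : Nat) : pvCh (n + 1) = pvCh n + n := by
  cases n with
  | zero => rfl
  | succ m =>
    unfold pvCh
    simp only [Nat.add_sub_cancel]
    have h : (m + 1 + 1) * (m + 1) = (m + 1) * m + 2 * (m + 1) := by ring
    omega

lemma pvDedup_append_singleton (L : List (List Char)) (x : List Char) :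
    PySem.List.dedup (L ++ [x]) = if x ∈ L then PySem.List.dedup L else PySem.List.dedup L ++ [x] := by
  simp only [PySem.List.dedup_eq_ofList, PySem.Set.ofList_eq_foldl, List.foldl_append,
    List.foldl_cons, List.foldl_nil]
  rw [PySem.Set.add]
  rw [show (List.foldl PySem.Set.add [] L).contains x = decide (x ∈ List.foldl PySem.Set.add [] L) from ?_]
  · rw [← PySem.Set.ofList_eq_foldl]
    by_cases h : x ∈ L
    · simp [h, (PySem.Set.mem_ofList L x).mpr h]
    · simp [h]
  · simp [PySem.Set.contains]

-- sum of C(count,2) over the distinct values = number of equal pairs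
lemma pvCounterSum (L : List (List Char)) :
    ((PySem.List.dedup L).map (fun v => pvCh (L.count v))).sum = pvPc L := by
  induction L using List.reverseRecOn with
  | nil => rfl
  | append_singleton L x ih =>
    rw [pvPc_append_singleton, pvDedup_append_singleton]
    by_cases hx : x ∈ L
    · rw [if_pos hx]
      have hxd : x ∈ PySem.List.dedup L := by
        rw [PySem.List.dedup_eq_ofList]
        exact (PySem.Set.mem_ofList L x).mpr hx
      obtain ⟨u, w, huw⟩ := List.mem_iff_append.mp hxd
      have hnd : (PySem.List.dedup L).Nodup := by
        rw [PySem.List.dedup_eq_ofList]; exact PySem.Set.nodup_ofList L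
      rw [huw] at hnd
      have hxu : x ∉ u := fun hxu =>
        (List.disjoint_of_nodup_append hnd) hxu List.mem_cons_self
      have hxw : x ∉ w := (List.nodup_cons.mp (List.nodup_append.mp hnd).2.1).1
      rw [huw] at ih ⊢
      rw [List.map_append, List.sum_append, List.map_cons, List.sum_cons] at ih ⊢
      have hu : u.map (fun v => pvCh ((L ++ [x]).count v)) = u.map (fun v => pvCh (L.count v)) :=
        List.map_congr_left (fun v hv => by
          have hne : v ≠ x := fun h => hxu (h ▸ hv)
          simp [List.count_append, pvCount_singleton', hne])
      have hw : w.map (fun v => pvCh ((L ++ [x]).count v)) = w.map (fun v => pvCh (L.count v)) :=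
        List.map_congr_left (fun v hv => by
          have hne : v ≠ x := fun h => hxw (h ▸ hv)
          simp [List.count_append, pvCount_singleton', hne])
      have hmid : pvCh ((L ++ [x]).count x) = pvCh (L.count x) + L.count x := by
        rw [List.count_append, pvCount_singleton' x x, if_pos rfl, pvCh_succ]
      rw [hu, hw, hmid]
      omega
    · rw [if_neg hx]
      have hLx : L.count x = 0 := List.count_eq_zero.mpr hx
      rw [List.map_append, List.sum_append]
      have hmap : (PySem.List.dedup L).map (fun v => pvCh ((L ++ [x]).count v))
          = (PySem.List.dedup L).map (fun v => pvCh (L.count v)) :=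
        List.map_congr_left (fun v hv => by
          have hvL : v ∈ L := by
            rw [PySem.List.dedup_eq_ofList] at hv
            exact (PySem.Set.mem_ofList L v).mp hv
          have hne : v ≠ x := fun h => hx (h ▸ hvL)
          simp [List.count_append, pvCount_singleton', hne])
      rw [hmap, ih]
      simp [List.count_append, pvCount_singleton', hLx, pvCh]

lemma pvChInt (n : Nat) :
    (if (n : Int) > 1 then PySem.Int.floordiv ((n : Int) * ((n : Int) - 1)) 2 else 0) = (pvCh n : Int) := by
  rcases n with _ | _ | n
  · simp [pvCh]
  · norm_num [pvCh]
  · have h2 : ((n + 2 : Nat) : Int) > 1 := by push_cast; omega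
    rw [if_pos h2]
    have hcast : ((n + 2 : Nat) : Int) * (((n + 2 : Nat) : Int) - 1) = (((n + 2) * (n + 1) : Nat) : Int) := by
      push_cast; ring
    rw [hcast]
    have hfd : PySem.Int.floordiv ((((n + 2) * (n + 1) : Nat)) : Int) 2
        = ((((n + 2) * (n + 1)) / 2 : Nat) : Int) := by
      exact_mod_cast PySem.Int.floordiv_natCast ((n + 2) * (n + 1)) 2
    rw [hfd]
    simp only [pvCh, Nat.add_sub_cancel]

lemma pvVariantsA_gen : ∀ (l pre : List Char) (acc : List (List Char)),
    (PySem.List.pyRange (pre.length : Int) ((pre.length : Int) + (l.length : Int)) 1).foldl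
      (fun variants i =>
        if PySem.List.pyGet? (pre ++ l) i ≠ some '-' then
          variants ++ [PySem.List.slice (pre ++ l) none (some i) ++ '?' :: PySem.List.slice (pre ++ l) (some (i + 1)) none]
        else variants) acc
    = acc ++ (pvV l).map (fun v => pre ++ v) := by
  intro l
  induction l with
  | nil =>
    intro pre acc
    rw [show (pre.length : Int) + (([] : List Char).length : Int) = (pre.length : Int) from by simp]
    rw [PySem.List.pyRange_one_eq_nil (le_refl _)]
    simp [pvV]
  | cons c s ih =>
    intro pre acc
    have hlt : (pre.length : Int) < (pre.length : Int) + ((c :: s).length : Int) := by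
      push_cast [List.length_cons]; omega
    rw [PySem.List.pyRange_one_cons hlt, List.foldl_cons]
    have hget : PySem.List.pyGet? (pre ++ c :: s) ((pre.length : Int)) = some c :=
      PySem.List.pyGet?_append_length pre s c
    have hslice1 : PySem.List.slice (pre ++ c :: s) none (some (pre.length : Int)) = pre := by
      rw [PySem.List.slice_to_natCast]
      exact List.take_left ..
    have hslice2 : PySem.List.slice (pre ++ c :: s) (some ((pre.length : Int) + 1)) none = s := by
      have hcast : (pre.length : Int) + 1 = ((pre.length + 1 : Nat) : Int) := by push_cast; ring
      rw [hcast, PySem.List.slice_from_natCast]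
      rw [show pre ++ c :: s = (pre ++ [c]) ++ s from by simp]
      rw [show pre.length + 1 = (pre ++ [c]).length from by simp]
      exact List.drop_left ..
    simp only [hget, hslice1, hslice2]
    rw [show pre ++ c :: s = (pre ++ [c]) ++ s from by simp]
    rw [show (pre.length : Int) + 1 = ((pre ++ [c]).length : Int) from by push_cast [List.length_append, List.length_cons, List.length_nil]; omega]
    rw [show (pre.length : Int) + ((c :: s).length : Int) = ((pre ++ [c]).length : Int) + (s.length : Int) from by
      push_cast [List.length_append, List.length_cons, List.length_nil]; omega]
    rw [ih (pre ++ [c])]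
    by_cases hc : c = '-'
    · subst hc
      simp [pvV, List.map_map, Function.comp_def]
    · have hne : some c ≠ some '-' := fun h => hc (Option.some.injEq .. ▸ h)
      rw [if_pos hne]
      have hV : pvV (c :: s) = [('?' :: s)] ++ (pvV s).map (c :: ·) := by
        simp [pvV, hc]
      rw [hV]
      simp [List.map_map, Function.comp_def]

lemma pvVariantsA_eq (l : List Char) : pvVariantsA l = pvV l := by
  have h := pvVariantsA_gen l [] []
  simp only [List.length_nil, Nat.cast_zero, zero_add, List.nil_append] at h
  unfold pvVariantsA
  rw [h]
  simp

lemma pvCastSum (l : List Nat) : (l.map (fun n : Nat => (n : Int))).sum = ((l.sum : Nat) : Int) := by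
  induction l with
  | nil => simp
  | cons x xs ih =>
    simp only [List.map_cons, List.sum_cons, ih]
    push_cast
    ring

lemma pvDict_eq (codes : List String) :
    codes.foldl (fun d code => (pvV code.toList).foldl (fun d v => d.modify v 0 (· + 1)) d)
      (PySem.Dict.empty : PySem.Dict (List Char) Int)
    = PySem.Dict.counter (codes.flatMap (fun code => pvV code.toList)) := by
  rw [PySem.Dict.counter_eq_foldl]
  exact Eq.symm (List.foldl_flatMap ..)

-- A's result is the number of equal unordered pairs in the variant stream
lemma pvA_eq (codes : List String) :
    count_similar_pairs codes = (pvPc (codes.flatMap (fun c => pvV c.toList)) : Int) := by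
  unfold count_similar_pairs
  simp only [pvVariantsA_eq]
  rw [pvDict_eq]
  set L := codes.flatMap (fun code => pvV code.toList) with hL
  simp only [PySem.Dict.values, PySem.Dict.items_counter, List.map_map, Function.comp_def]
  have hcongr := PySem.List.foldl_congr_mem
    (l := (PySem.Set.ofList L).map (fun k => (L.count k : Int)))
    (init := (0 : Int))
    (f := fun similar_pairs count =>
      if count > 1 then similar_pairs + PySem.Int.floordiv (count * (count - 1)) 2 else similar_pairs)
    (g := fun acc c => acc + (if c > 1 then PySem.Int.floordiv (c * (c - 1)) 2 else 0))
    (fun acc x _ => by dsimp only; split_ifs <;> simp)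
  rw [hcongr, PySem.List.foldl_add, zero_add, List.map_map]
  simp only [Function.comp_def]
  rw [List.map_congr_left (fun k (_ : k ∈ PySem.Set.ofList L) => pvChInt (L.count k))]
  rw [show (fun k => ((pvCh (L.count k) : Nat) : Int)) = (fun n : Nat => (n : Int)) ∘ (fun k => pvCh (L.count k)) from rfl]
  rw [← List.map_map, pvCastSum]
  rw [show PySem.Set.ofList L = PySem.List.dedup L from (PySem.List.dedup_eq_ofList L).symm]
  rw [pvCounterSum]

-- B's inner loop over one code, abstracted: fold the per-variant step over pvV of the code
def pvStep (st : List (List Char) × Int) (v : List Char) : List (List Char) × Int :=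
  (st.1 ++ [v], st.2 + (PySem.List.count st.1 v : Int))

lemma pvEnum_gen : ∀ (l pre : List Char) (st : List (List Char) × Int),
    (PySem.List.enumerate l (pre.length : Int)).foldl (fun st p =>
        if p.2 ≠ '-' then
          (st.1 ++ [PySem.List.slice (pre ++ l) none (some p.1) ++
                    '?' :: PySem.List.slice (pre ++ l) (some (p.1 + 1)) none],
           st.2 + (PySem.List.count st.1 (PySem.List.slice (pre ++ l) none (some p.1) ++
                    '?' :: PySem.List.slice (pre ++ l) (some (p.1 + 1)) none) : Int))
        else st) st
    = ((pvV l).map (fun v => pre ++ v)).foldl pvStep st := by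
  intro l
  induction l with
  | nil => intro pre st; simp [PySem.List.enumerate, pvV]
  | cons c s ih =>
    intro pre st
    rw [PySem.List.enumerate_cons, List.foldl_cons]
    have hslice1 : PySem.List.slice (pre ++ c :: s) none (some (pre.length : Int)) = pre := by
      rw [PySem.List.slice_to_natCast]
      exact List.take_left ..
    have hslice2 : PySem.List.slice (pre ++ c :: s) (some ((pre.length : Int) + 1)) none = s := by
      have hcast : (pre.length : Int) + 1 = ((pre.length + 1 : Nat) : Int) := by push_cast; ring
      rw [hcast, PySem.List.slice_from_natCast]
      rw [show pre ++ c :: s = (pre ++ [c]) ++ s from by simp]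
      rw [show pre.length + 1 = (pre ++ [c]).length from by simp]
      exact List.drop_left ..
    simp only [hslice1, hslice2]
    have hupd : ∀ st' : List (List Char) × Int,
        (PySem.List.enumerate s ((pre.length : Int) + 1)).foldl (fun st p =>
          if p.2 ≠ '-' then
            (st.1 ++ [PySem.List.slice (pre ++ c :: s) none (some p.1) ++
                      '?' :: PySem.List.slice (pre ++ c :: s) (some (p.1 + 1)) none],
             st.2 + (PySem.List.count st.1 (PySem.List.slice (pre ++ c :: s) none (some p.1) ++
                      '?' :: PySem.List.slice (pre ++ c :: s) (some (p.1 + 1)) none) : Int))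
          else st) st'
        = ((pvV s).map (fun v => (pre ++ [c]) ++ v)).foldl pvStep st' := by
      intro st'
      have hlen : (pre.length : Int) + 1 = (((pre ++ [c]).length : Nat) : Int) := by
        push_cast [List.length_append, List.length_cons, List.length_nil]; omega
      have hlist : pre ++ c :: s = (pre ++ [c]) ++ s := by simp
      rw [hlen, hlist]
      exact ih (pre ++ [c]) st'
    by_cases hc : c = '-'
    · subst hc
      rw [if_neg (by simp)]
      rw [hupd st]
      simp [pvV, List.map_map, Function.comp_def]
    · rw [if_pos (by simpa using hc)]
      rw [hupd]
      have hV : pvV (c :: s) = ('?' :: s) :: (pvV s).map (c :: ·) := by simp [pvV, hc]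
      rw [hV]
      simp [pvStep, List.map_map, Function.comp_def]

-- the fold of pvStep counts, for each element, its equal predecessors
lemma pvStep_fold : ∀ (vs : List (List Char)) (seen : List (List Char)) (tot : Int),
    (vs.foldl pvStep (seen, tot)).2 = tot + (pvCross seen vs : Int) + (pvPc vs : Int) := by
  intro vs
  induction vs with
  | nil => intro seen tot; simp [pvCross, pvPc]
  | cons v vs ih =>
    intro seen tot
    rw [List.foldl_cons]
    show (vs.foldl pvStep (seen ++ [v], tot + (PySem.List.count seen v : Int))).2 = _
    rw [ih]
    rw [PySem.List.count_eq]
    have h1 : pvCross (seen ++ [v]) vs = pvCross seen vs + vs.count v := by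
      rw [pvCross_append_left, pvCross_singleton_left]
    have h2 : pvCross seen (v :: vs) = seen.count v + pvCross seen vs := by
      rw [show v :: vs = [v] ++ vs from rfl, pvCross_append_right, pvCross_singleton_right]
    have h3 : pvPc (v :: vs) = vs.count v + pvPc vs := rfl
    rw [h1, h2, h3]
    push_cast
    ring

-- B's result is the same pair count over the same variant stream
lemma pvB_eq (codes : List String) :
    count_similar_pairs_alt codes = (pvPc (codes.flatMap (fun c => pvV c.toList)) : Int) := by
  unfold count_similar_pairs_alt
  have houter : ∀ (code : String) (st : List (List Char) × Int),
      (PySem.List.enumerate code.toList).foldl (fun st p =>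
        if p.2 ≠ '-' then
          (st.1 ++ [PySem.List.slice code.toList none (some p.1) ++
                    '?' :: PySem.List.slice code.toList (some (p.1 + 1)) none],
           st.2 + (PySem.List.count st.1 (PySem.List.slice code.toList none (some p.1) ++
                    '?' :: PySem.List.slice code.toList (some (p.1 + 1)) none) : Int))
        else st) st
      = (pvV code.toList).foldl pvStep st := by
    intro code st
    have h := pvEnum_gen code.toList [] st
    simpa using h
  calc (codes.foldl (fun st code =>
      (PySem.List.enumerate code.toList).foldl (fun st p =>
        if p.2 ≠ '-' then
          (st.1 ++ [PySem.List.slice code.toList none (some p.1) ++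
                   '?' :: PySem.List.slice code.toList (some (p.1 + 1)) none],
           st.2 + (PySem.List.count st.1 (PySem.List.slice code.toList none (some p.1) ++
                   '?' :: PySem.List.slice code.toList (some (p.1 + 1)) none) : Int))
        else st) st)
    (([], 0) : List (List Char) × Int)).2
      = (codes.foldl (fun st code => (pvV code.toList).foldl pvStep st) ([], 0)).2 := by
        have hfun : (fun (st : List (List Char) × Int) (code : String) =>
            (PySem.List.enumerate code.toList).foldl (fun st p =>
              if p.2 ≠ '-' then
                (st.1 ++ [PySem.List.slice code.toList none (some p.1) ++
                         '?' :: PySem.List.slice code.toList (some (p.1 + 1)) none],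
                 st.2 + (PySem.List.count st.1 (PySem.List.slice code.toList none (some p.1) ++
                         '?' :: PySem.List.slice code.toList (some (p.1 + 1)) none) : Int))
              else st) st)
            = (fun (st : List (List Char) × Int) (code : String) => (pvV code.toList).foldl pvStep st) :=
          funext fun st => funext fun code => houter code st
        rw [hfun]
    _ = ((codes.flatMap (fun c => pvV c.toList)).foldl pvStep ([], 0)).2 := by
        rw [List.foldl_flatMap]
    _ = (pvPc (codes.flatMap (fun c => pvV c.toList)) : Int) := by
        rw [pvStep_fold]
        simp [pvCross]

-- ===== VERDICT (by name: the statement is the Claim_ definition above) =====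
theorem count_similar_pairs_spec : Claim_equal_count_similar_pairs := by
  intro codes _hdom
  unfold Spec_count_similar_pairs
  rw [pvA_eq, pvB_eq]
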